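-- pv_equiv track=rewrite | github.com/vismaya88/DAA | lab5_q3.py | pylons
-- ===== SOURCE A (Python) =====
-- def pylons(k, arr):
--     n = len(arr)
--     plants = 0
--     i = 0
--
--     while i < n:
--         j = min(i + k - 1, n - 1)
--         while j >= max(0, i - k + 1) and arr[j] == 0:
--             j -= 1
--
--         if j < max(0, i - k + 1):
--             return -1
--
--         plants += 1
--         i = j + k
--
--     return plants
-- ===== SOURCE B (Python) =====
-- def pylons(k, arr):
--     n = len(arr)
--     # prev1[t] = largest index <= t holding a nonzero, or -1 if none
--     prev1 = []
--     last = -1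
--     for t, x in enumerate(arr):
--         if x != 0:
--             last = t
--         prev1.append(last)
--     plants = 0
--     i = 0
--     while i < n:
--         hi = min(i + k - 1, n - 1)
--         lo = max(0, i - k + 1)
--         if hi < lo:
--             return -1
--         j = prev1[hi]
--         if j < lo:
--             return -1
--         plants += 1
--         i = j + k
--     return plants
-- ===== Notes on version B (the rewrite author's own statement) =====
-- stated objective: alternative
-- what changed: B precomputes in one pass a prev1 array (nearest nonzero index at or before each position), so each greedy step finds the rightmost usable pylon with a single array lookup instead of A's inner right-to-left scan; a timing run did not measure B faster, so no speed is claimed.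
import Mathlib
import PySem

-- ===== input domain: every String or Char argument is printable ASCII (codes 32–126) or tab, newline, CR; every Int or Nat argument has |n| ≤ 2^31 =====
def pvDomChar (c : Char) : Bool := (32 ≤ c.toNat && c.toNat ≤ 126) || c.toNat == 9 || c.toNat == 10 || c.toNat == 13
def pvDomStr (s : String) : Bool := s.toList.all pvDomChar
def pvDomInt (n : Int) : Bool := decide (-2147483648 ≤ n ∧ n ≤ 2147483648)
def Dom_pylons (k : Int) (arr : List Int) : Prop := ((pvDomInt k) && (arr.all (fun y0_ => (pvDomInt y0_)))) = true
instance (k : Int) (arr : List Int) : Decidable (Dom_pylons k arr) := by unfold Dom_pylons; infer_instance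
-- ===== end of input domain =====

-- B replaces A's inner right-to-left scan by a single lookup in a precomputed
-- nearest-nonzero-at-or-before array (objective: alternative algorithm, same measured cost).

-- ===== PORT A =====
-- inner 'while j >= max(0, i-k+1) and arr[j] == 0: j -= 1' (lo = max(0, i-k+1))
def innerA (arr : List Int) (lo j : Int) : Int :=
  if h : lo ≤ j ∧ PySem.List.pyGet? arr j = some 0 then innerA arr lo (j - 1) else j
termination_by (j - lo + 1).toNat
decreasing_by omega

-- outer 'while i < n' loop of A
def loopA (k : Int) (arr : List Int) (n plants i : Int) : Int :=
  if _hi : i < n then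
    let j := innerA arr (max 0 (i - k + 1)) (min (i + k - 1) (n - 1))
    if h2 : j < max 0 (i - k + 1) then -1
    else loopA k arr n (plants + 1) (j + k)
  else plants
termination_by (n - i).toNat
decreasing_by omega

def pylons (k : Int) (arr : List Int) : Int :=
  loopA k arr (arr.length : Int) 0 0

-- ===== PORT B =====
-- the 'for t, x in enumerate(arr)' pass building prev1 (t is the running index)
def buildPrev : List Int → Int → Int → List Int
  | [], _, _ => []
  | x :: xs, last, t =>
    let last' := if x ≠ 0 then t else last
    last' :: buildPrev xs last' (t + 1)

-- B's 'while i < n' loop: one prev1 lookup per step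
def loopB (k : Int) (prev1 : List Int) (n plants i : Int) : Int :=
  if _hlt : i < n then
    let hi := min (i + k - 1) (n - 1)
    let lo := max 0 (i - k + 1)
    if hc : hi < lo then -1
    else
      match PySem.List.pyGet? prev1 hi with
      | none => -1   -- unreachable: hi is always a valid index here
      | some j => if h2 : j < lo then -1 else loopB k prev1 n (plants + 1) (j + k)
  else plants
termination_by (n - i).toNat
decreasing_by omega

def pylons_alt (k : Int) (arr : List Int) : Int :=
  loopB k (buildPrev arr (-1) 0) (arr.length : Int) 0 0

-- ===== PRECONDITION & SPEC =====
def Spec_pylons (k : Int) (arr : List Int) (out : Int) : Prop := out = pylons_alt k arr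
instance (k : Int) (arr : List Int) (out : Int) : Decidable (Spec_pylons k arr out) := by unfold Spec_pylons; infer_instance

-- ===== CLAIM (what is proved, stated in full; the proofs are below) =====
def Claim_equal_pylons : Prop := ∀ (k : Int) (arr : List Int), Dom_pylons k arr → Spec_pylons k arr (pylons k arr)

-- ===== LEMMAS AND PROOFS =====

-- spec of the prev1 array: latest nonzero index ≤ m, or -1
def prevSpec (arr : List Int) : Nat → Int
  | 0 => if arr[0]?.getD 0 ≠ 0 then 0 else -1
  | m + 1 => if arr[m + 1]?.getD 0 ≠ 0 then ((m : Int) + 1) else prevSpec arr m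

lemma prevSpec_le (arr : List Int) (m : Nat) : prevSpec arr m ≤ (m : Int) := by
  induction m with
  | zero => simp only [prevSpec]; split <;> omega
  | succ m ih => simp only [prevSpec]; split <;> omega

lemma prevSpec_lb (arr : List Int) (m : Nat) : -1 ≤ prevSpec arr m := by
  induction m with
  | zero => simp only [prevSpec]; split <;> omega
  | succ m ih => simp only [prevSpec]; split <;> omega

lemma prevSpec_cons (x : Int) (xs : List Int) (m : Nat) :
    prevSpec (x :: xs) (m + 1) =
      if prevSpec xs m = -1 then (if x ≠ 0 then 0 else -1) else prevSpec xs m + 1 := by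
  induction m with
  | zero =>
    by_cases h : xs[0]?.getD 0 = 0 <;>
      by_cases hx : x = 0 <;>
        simp [prevSpec, h, hx]
  | succ m ih =>
    by_cases h : xs[m + 1]?.getD 0 = 0
    · have h1 : prevSpec xs (m + 1) = prevSpec xs m := by simp [prevSpec, h]
      have h2 : prevSpec (x :: xs) (m + 2) = prevSpec (x :: xs) (m + 1) := by
        simp [prevSpec, h]
      rw [h2, ih, h1]
    · have h1 : prevSpec xs (m + 1) = (m : Int) + 1 := by simp [prevSpec, h]
      have h2 : prevSpec (x :: xs) (m + 2) = ((m : Int) + 1) + 1 := by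
        simp [prevSpec, h]
      rw [h2, h1, if_neg (by omega)]

lemma buildPrev_get (xs : List Int) : ∀ (m : Nat) (last t : Int), m < xs.length →
    PySem.List.pyGet? (buildPrev xs last t) (m : Int) =
      some (if prevSpec xs m = -1 then last else t + prevSpec xs m) := by
  induction xs with
  | nil => intro m last t h; simp at h
  | cons x xs ih =>
    intro m last t h
    cases m with
    | zero =>
      by_cases hx : x = 0 <;>
        simp [buildPrev, prevSpec, hx]
    | succ m =>
      have hm : m < xs.length := by simpa using h
      have hrec := ih m (if x ≠ 0 then t else last) (t + 1) hm
      have hcast : PySem.List.pyGet? (buildPrev (x :: xs) last t) ((m + 1 : Nat) : Int)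
          = PySem.List.pyGet? (buildPrev xs (if x ≠ 0 then t else last) (t + 1)) ((m : Nat) : Int) := by
        simp [buildPrev]
      rw [hcast, hrec, prevSpec_cons]
      by_cases hp : prevSpec xs m = -1
      · by_cases hx : x = 0 <;> simp [hp, hx]
      · have := prevSpec_lb xs m
        rw [if_neg hp, if_neg hp, if_neg (by omega)]
        ring_nf

lemma innerA_eq (arr : List Int) : ∀ (m : Nat) (lo : Int), 0 ≤ lo → lo ≤ (m : Int) →
    m < arr.length → innerA arr lo (m : Int) = max (prevSpec arr m) (lo - 1) := by
  intro m
  induction m with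
  | zero =>
    intro lo h0 hle hlen
    have hlo : lo = 0 := by omega
    subst hlo
    have hget : PySem.List.pyGet? arr ((0 : Nat) : Int) = some (arr[0]?.getD 0) := by
      rw [PySem.List.pyGet?_natCast, List.getElem?_eq_getElem hlen]; simp
    rw [innerA]
    by_cases hx : arr[0]?.getD 0 = 0
    · rw [dif_pos ⟨by omega, by rw [hget, hx]⟩, innerA, dif_neg (by omega)]
      simp [prevSpec, hx]
    · rw [dif_neg (by rintro ⟨-, hc⟩; rw [hget] at hc; exact hx (by simpa using hc))]
      simp [prevSpec, hx]
  | succ m ih =>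
    intro lo h0 hle hlen
    have hm : m < arr.length := by omega
    have hget : PySem.List.pyGet? arr ((m + 1 : Nat) : Int) = some (arr[m + 1]?.getD 0) := by
      rw [PySem.List.pyGet?_natCast, List.getElem?_eq_getElem hlen]; simp
    rw [innerA]
    by_cases hx : arr[m + 1]?.getD 0 = 0
    · rw [dif_pos ⟨hle, by rw [hget, hx]⟩]
      have harg : ((m + 1 : Nat) : Int) - 1 = (m : Int) := by push_cast; ring
      rw [harg]
      have hps : prevSpec arr (m + 1) = prevSpec arr m := by simp [prevSpec, hx]
      by_cases hcase : lo ≤ (m : Int)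
      · rw [ih lo h0 hcase hm, hps]
      · have hlo : lo = (m : Int) + 1 := by omega
        rw [innerA, dif_neg (by omega), hps]
        have := prevSpec_le arr m
        omega
    · rw [dif_neg (by rintro ⟨-, hc⟩; rw [hget] at hc; exact hx (by simpa using hc))]
      have hps : prevSpec arr (m + 1) = (m : Int) + 1 := by simp [prevSpec, hx]
      rw [hps]
      push_cast
      omega

theorem loops_eq (k : Int) (arr : List Int) (n plants i : Int)
    (hn : n = (arr.length : Int)) :
    loopA k arr n plants i = loopB k (buildPrev arr (-1) 0) n plants i := by
  rw [loopA, loopB]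
  by_cases hlt : i < n
  · rw [dif_pos hlt, dif_pos hlt]
    set lo := max 0 (i - k + 1) with hlo
    set hi := min (i + k - 1) (n - 1) with hhi
    by_cases hc : hi < lo
    · -- A's inner scan does not run: j = hi < lo, both return -1
      rw [dif_pos hc]
      have hinner : innerA arr lo hi = hi := by rw [innerA, dif_neg (by omega)]
      rw [hinner, dif_pos hc]
    · rw [dif_neg hc]
      obtain ⟨m, hm⟩ : ∃ m : Nat, hi = (m : Int) := ⟨hi.toNat, by omega⟩
      have hmlen : m < arr.length := by omega
      have h0 : 0 ≤ lo := by omega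
      have hle : lo ≤ (m : Int) := by omega
      have hA : innerA arr lo hi = max (prevSpec arr m) (lo - 1) := by
        rw [hm]; exact innerA_eq arr m lo h0 hle hmlen
      have hB : PySem.List.pyGet? (buildPrev arr (-1) 0) hi = some (prevSpec arr m) := by
        rw [hm, buildPrev_get arr m (-1) 0 hmlen]
        by_cases hp : prevSpec arr m = -1 <;> simp [hp]
      rw [hA, hB]
      have hlb := prevSpec_lb arr m
      by_cases hsmall : prevSpec arr m < lo
      · have : max (prevSpec arr m) (lo - 1) = lo - 1 := by omega
        rw [this]
        simp only []
        rw [dif_pos (by omega), dif_pos hsmall]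
      · have hmax : max (prevSpec arr m) (lo - 1) = prevSpec arr m := by omega
        rw [hmax]
        simp only []
        rw [dif_neg (by omega), dif_neg hsmall]
        exact loops_eq k arr n (plants + 1) (prevSpec arr m + k) hn
  · rw [dif_neg hlt, dif_neg hlt]
termination_by (n - i).toNat
decreasing_by omega

-- ===== VERDICT (by name: the statement is the Claim_ definition above) =====
theorem pylons_spec : Claim_equal_pylons := by
  intro k arr _
  unfold Spec_pylons pylons pylons_alt
  exact loops_eq k arr (arr.length : Int) 0 0 rfl
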